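-- pv_equiv track=rewrite | github.com/curegit/halftone-converter | halftonecv/modules/core.py | reflect
-- ===== SOURCE A (Python) =====
-- def reflect(x, k):
-- 	if x < 0:
-- 		return reflect(-x, k)
-- 	elif x <= k:
-- 		return x
-- 	elif x <= 2 * k:
-- 		return 2 * k - x
-- 	else:
-- 		return reflect(x % (2 * k), k)
-- ===== SOURCE B (Python) =====
-- def reflect(x, k):
--     # closed-form triangle wave instead of recursive case descent
--     a = -x if x < 0 else x
--     if a <= k:
--         return a
--     r = a % (2 * k)
--     return r if r <= k else 2 * k - r
-- ===== Notes on version B (the rewrite author's own statement) =====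
-- stated objective: simpler
-- what changed: Replaces A's recursion with a single arithmetic step: fold x to a = |x|, return it if a <= k, otherwise reflect a % (2k) around k with one comparison.
import Mathlib
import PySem

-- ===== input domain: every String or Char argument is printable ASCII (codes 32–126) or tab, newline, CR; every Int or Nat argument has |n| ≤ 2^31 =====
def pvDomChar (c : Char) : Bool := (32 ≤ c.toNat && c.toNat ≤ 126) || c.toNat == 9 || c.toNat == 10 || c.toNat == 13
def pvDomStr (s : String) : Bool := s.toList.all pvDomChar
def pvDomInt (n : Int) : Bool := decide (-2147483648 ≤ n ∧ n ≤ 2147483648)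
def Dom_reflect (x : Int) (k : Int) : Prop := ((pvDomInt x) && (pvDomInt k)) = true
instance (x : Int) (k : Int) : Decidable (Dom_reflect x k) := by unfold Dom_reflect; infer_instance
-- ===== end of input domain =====

-- B replaces A's recursive mirroring with a closed-form triangle wave (one abs, one mod, one comparison): simpler.


-- ===== PORT A =====
-- A is recursive; ported with fuel 100: inside Pre_reflect the recursion depth is at most 3
-- (one step for x < 0, one step for x > 2k, then a base case), so the fuel is never exhausted there.
def reflectFuel : Nat → Int → Int → Int
  | 0, _, _ => 0
  | n+1, x, k =>
    if x < 0 then reflectFuel n (-x) k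
    else if x ≤ k then x
    else if x ≤ 2*k then 2*k - x
    else reflectFuel n (PySem.Int.mod x (2*k)) k

def reflect (x : Int) (k : Int) : Int := reflectFuel 100 x k

-- ===== PORT B =====
def reflect_alt (x : Int) (k : Int) : Int :=
  let a := if x < 0 then -x else x
  if a ≤ k then a
  else
    let r := PySem.Int.mod a (2*k)
    if r ≤ k then r else 2*k - r

-- ===== PRECONDITION & SPEC =====
-- Pre_ excludes exactly the inputs on which Python A raises: k = 0 with x ≠ 0 (ZeroDivisionError)
-- and k < 0 (unbounded recursion, RecursionError). A returns on every admitted input.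
def Pre_reflect (x : Int) (k : Int) : Prop := 0 < k ∨ (x = 0 ∧ k = 0)
instance (x : Int) (k : Int) : Decidable (Pre_reflect x k) := by unfold Pre_reflect; infer_instance
def pvWitness_reflect : Int × Int := (7, 3)

def Spec_reflect (x : Int) (k : Int) (out : Int) : Prop := out = reflect_alt x k
instance (x : Int) (k : Int) (out : Int) : Decidable (Spec_reflect x k out) := by unfold Spec_reflect; infer_instance

-- ===== CLAIM (what is proved, stated in full; the proofs are below) =====
def Claim_equal_reflect : Prop := ∀ (x : Int) (k : Int), Dom_reflect x k → Pre_reflect x k → Spec_reflect x k (reflect x k)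

-- ===== LEMMAS AND PROOFS =====

-- one-step unfolding of the fuelled recursion (used instead of simp-unfolding, which blows up)
theorem reflectFuel_succ (n : Nat) (x k : Int) :
    reflectFuel (n+1) x k =
      if x < 0 then reflectFuel n (-x) k
      else if x ≤ k then x
      else if x ≤ 2*k then 2*k - x
      else reflectFuel n (PySem.Int.mod x (2*k)) k := rfl

-- B is symmetric in x ↦ -x by construction.
theorem reflect_alt_neg (x k : Int) (hx : x < 0) : reflect_alt (-x) k = reflect_alt x k := by
  have h1 : ¬ (-x < 0) := by omega
  simp only [reflect_alt]
  rw [if_neg h1, if_pos hx]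

-- the nonnegative case: two units of fuel suffice for 0 ≤ x, 0 < k
theorem reflectFuel_pos (n : Nat) (x k : Int) (hk : 0 < k) (hx : 0 ≤ x) :
    reflectFuel (n+2) x k = reflect_alt x k := by
  have h2k : 0 < 2*k := by omega
  have hmod : ∀ a : Int, PySem.Int.mod a (2*k) = a % (2*k) :=
    fun a => PySem.Int.mod_eq_emod_of_pos h2k
  have hnot : ¬ x < 0 := by omega
  rw [reflectFuel_succ]
  simp only [hnot, if_false, reflect_alt]
  by_cases h1 : x ≤ k
  · simp [h1]
  · simp only [h1, if_false]
    by_cases h2 : x ≤ 2*k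
    · -- k < x ≤ 2k : A returns 2k - x directly
      simp only [h2, if_true, hmod]
      by_cases h3 : x = 2*k
      · have : x % (2*k) = 0 := by rw [h3]; exact Int.emod_self
        rw [this]
        simp only [if_pos (le_of_lt hk)]
        omega
      · have : x % (2*k) = x := Int.emod_eq_of_lt (by omega) (by omega)
        rw [this]
        simp [h1]
    · -- x > 2k : A recurses on x % (2k)
      simp only [h2, if_false, hmod]
      rw [reflectFuel_succ]
      set m := x % (2*k) with hm
      have hm0 : 0 ≤ m := Int.emod_nonneg x (by omega)
      have hmlt : m < 2*k := Int.emod_lt_of_pos x h2k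
      have hmn : ¬ m < 0 := by omega
      simp only [hmod, hmn, if_false]
      by_cases h4 : m ≤ k
      · simp [h4]
      · simp [h4, le_of_lt hmlt]

-- ===== VERDICT (by name: the statement is the Claim_ definition above) =====
theorem reflect_spec : Claim_equal_reflect := by
  intro x k _ hpre
  unfold Spec_reflect
  rcases hpre with hk | ⟨hx0, hk0⟩
  · by_cases hx : x < 0
    · have step : reflect x k = reflectFuel 99 (-x) k := by
        rw [show reflect x k = reflectFuel (99+1) x k from rfl, reflectFuel_succ, if_pos hx]
      rw [step, show (99:Nat) = 97+2 from rfl, reflectFuel_pos 97 (-x) k hk (by omega),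
        reflect_alt_neg x k hx]
    · rw [show reflect x k = reflectFuel (98+2) x k from rfl,
        reflectFuel_pos 98 x k hk (by omega)]
  · subst hx0; subst hk0
    rw [show reflect 0 0 = reflectFuel (99+1) 0 0 from rfl, reflectFuel_succ]
    norm_num [reflect_alt]
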